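-- pv_equiv track=rewrite | github.com/TuGraph-family/Awesome-Text2GQL | base/CypherBase.py | merge_desc
-- ===== SOURCE A (Python) =====
-- def merge_desc(desc_list):
--     desc = ""
--     for i in range(len(desc_list)):
--         desc = desc + desc_list[i] + ","
--         if desc_list[i] == "":
--             desc = desc[:-1]
--         elif desc_list[i][-1] == "？" or desc_list[i][-1] == "?":
--             desc = desc[:-1]
--     if desc != "":
--         if desc[-1] == ",":
--             desc = desc[:-1]
--     return desc
-- ===== SOURCE B (Python) =====
-- def merge_desc(desc_list):
--     filtered = [e for e in desc_list if e != ""]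
--     parts = []
--     prev = None
--     for e in filtered:
--         if prev is not None and prev[-1] not in ("？", "?"):
--             parts.append(",")
--         parts.append(e)
--         prev = e
--     return "".join(parts)
-- ===== Notes on version B (the rewrite author's own statement) =====
-- stated objective: simpler
-- what changed: A appends a comma after every element and retracts it for empties/question-enders plus a final trailing-comma strip; B filters out empty strings once and makes a single pass that inserts the separator before each element based on whether the previous kept element ends in '?'/'？', so nothing is ever written and taken back.
import Mathlib
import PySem

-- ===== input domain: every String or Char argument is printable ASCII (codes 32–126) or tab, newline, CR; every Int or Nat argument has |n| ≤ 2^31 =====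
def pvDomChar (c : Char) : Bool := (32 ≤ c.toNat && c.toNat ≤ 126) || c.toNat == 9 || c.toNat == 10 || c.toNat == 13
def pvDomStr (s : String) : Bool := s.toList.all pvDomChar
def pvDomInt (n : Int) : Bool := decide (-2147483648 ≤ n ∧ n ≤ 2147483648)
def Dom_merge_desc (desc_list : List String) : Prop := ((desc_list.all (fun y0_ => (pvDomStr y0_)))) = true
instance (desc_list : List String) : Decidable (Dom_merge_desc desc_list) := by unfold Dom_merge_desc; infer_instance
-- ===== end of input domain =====

-- B replaces A's append-comma-then-retract loop and final strip by a filter of the empty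
-- strings followed by a single pass that decides the separator from the previous kept
-- element (objective: simpler — no comma is ever written and then taken back).

-- ===== PORT A =====
-- one loop iteration of A, over the characters of the accumulated string
-- (desc[:-1] = PySem.List.slice … (some (-1)); desc_list[i][-1] = PySem.List.pyGet? … (-1))
def mergeDescStepA (desc : List Char) (e : List Char) : List Char :=
  let d := desc ++ e ++ [',']
  if e = [] then PySem.List.slice d none (some (-1))
  else if PySem.List.pyGet? e (-1) = some '？' ∨ PySem.List.pyGet? e (-1) = some '?' then
    PySem.List.slice d none (some (-1))
  else d

-- A's final trailing-comma strip (the two ifs after the loop)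
def mergeDescFinal (c : List Char) : List Char :=
  if c ≠ [] then
    if PySem.List.pyGet? c (-1) = some ',' then PySem.List.slice c none (some (-1)) else c
  else c

def merge_desc (desc_list : List String) : String :=
  String.ofList (mergeDescFinal (desc_list.foldl (fun d s => mergeDescStepA d s.toList) []))

-- ===== PORT B =====
-- one loop iteration of B: state = (parts so far, previous kept element)
def mergeDescStepB (st : List Char × Option (List Char)) (e : List Char) :
    List Char × Option (List Char) :=
  let parts :=
    match st.2 with
    | none => st.1
    | some p =>
      if ¬ (PySem.List.pyGet? p (-1) = some '？' ∨ PySem.List.pyGet? p (-1) = some '?') then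
        st.1 ++ [',']
      else st.1
  (parts ++ e, some e)

def merge_desc_alt (desc_list : List String) : String :=
  let filtered := desc_list.filter (fun e => e ≠ "")
  String.ofList (filtered.foldl (fun st e => mergeDescStepB st e.toList) ([], none)).1

-- ===== PRECONDITION & SPEC =====
def Spec_merge_desc (desc_list : List String) (out : String) : Prop := out = merge_desc_alt desc_list
instance (desc_list : List String) (out : String) : Decidable (Spec_merge_desc desc_list out) := by unfold Spec_merge_desc; infer_instance

-- ===== CLAIM (what is proved, stated in full; the proofs are below) =====
def Claim_equal_merge_desc : Prop := ∀ (desc_list : List String), Dom_merge_desc desc_list → Spec_merge_desc desc_list (merge_desc desc_list)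

-- ===== LEMMAS AND PROOFS =====

-- 'e ends with ？ or ?' — the test both ports perform
def endsQ (e : List Char) : Bool :=
  decide (PySem.List.pyGet? e (-1) = some '？' ∨ PySem.List.pyGet? e (-1) = some '?')

-- the chunk A's loop contributes for one element
def chunkA (e : List Char) : List Char :=
  if e = [] then [] else if endsQ e then e else e ++ [',']

def chunksA : List (List Char) → List Char
  | [] => []
  | e :: r => chunkA e ++ chunksA r

-- the string B emits after a first kept element p, for the remaining kept elements
def sepChain : List Char → List (List Char) → List Char
  | _, [] => []
  | p, e :: r => (if endsQ p then [] else [',']) ++ e ++ sepChain e r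

-- B's whole output on the list of kept elements
def bChain : List (List Char) → List Char
  | [] => []
  | x :: r => x ++ sepChain x r

theorem stepA_eq (d e : List Char) : mergeDescStepA d e = d ++ chunkA e := by
  unfold mergeDescStepA chunkA endsQ
  split_ifs <;>
    simp_all [PySem.List.slice_to_neg_one, List.dropLast_append_of_ne_nil]

theorem foldA_eq (l : List (List Char)) (d : List Char) :
    l.foldl mergeDescStepA d = d ++ chunksA l := by
  induction l generalizing d with
  | nil => simp [chunksA]
  | cons e r ih => simp [List.foldl_cons, stepA_eq, chunksA, ih, List.append_assoc]

theorem foldB_eq (r : List (List Char)) (parts p : List Char) :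
    (r.foldl mergeDescStepB (parts, some p)).1 = parts ++ sepChain p r := by
  induction r generalizing parts p with
  | nil => simp [sepChain]
  | cons e rest ih =>
    simp only [List.foldl_cons, mergeDescStepB, sepChain, endsQ, decide_eq_true_eq]
    split_ifs with h <;> simp [ih, List.append_assoc]

theorem foldB_bChain (l : List (List Char)) :
    (l.foldl mergeDescStepB ([], none)).1 = bChain l := by
  cases l with
  | nil => rfl
  | cons x r =>
    simp only [List.foldl_cons, mergeDescStepB, bChain]
    simpa using foldB_eq r x x

theorem chunkA_ne_nil (e : List Char) (he : e ≠ []) : chunkA e ≠ [] := by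
  unfold chunkA
  split_ifs <;> simp_all

theorem chunksA_ne_nil (e : List Char) (r : List (List Char)) (he : e ≠ []) :
    chunksA (e :: r) ≠ [] := by
  simp only [chunksA]
  intro h
  exact chunkA_ne_nil e he (List.append_eq_nil_iff.mp h).1

theorem not_endsQ_comma (e : List Char) (hq : endsQ e = true) :
    ¬ PySem.List.pyGet? e (-1) = some ',' := by
  rcases of_decide_eq_true hq with h | h <;> simp [h]

-- main bridge: on a list of nonempty chunks, A's strip of its concatenation is B's output
theorem strip_chunks (l : List (List Char)) (hl : ∀ e ∈ l, e ≠ []) :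
    mergeDescFinal (chunksA l) = bChain l := by
  induction l with
  | nil => simp [mergeDescFinal, chunksA, bChain]
  | cons x r ih =>
    have hx : x ≠ [] := hl x (List.mem_cons_self ..)
    cases r with
    | nil =>
      rw [chunksA, chunksA, List.append_nil, chunkA, if_neg hx, bChain, sepChain,
        List.append_nil]
      by_cases hq : endsQ x = true
      · rw [if_pos hq]
        simp only [mergeDescFinal]
        rw [if_pos hx, if_neg (not_endsQ_comma x hq)]
      · rw [if_neg hq]
        simp only [mergeDescFinal]
        rw [if_pos (by simp), if_pos (by simp [PySem.List.pyGet?_neg_one]),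
          PySem.List.slice_to_neg_one]
        simp
    | cons y rr =>
      have hy : y ≠ [] := hl y (by simp)
      have hC : chunksA (y :: rr) ≠ [] := chunksA_ne_nil y rr hy
      have ihr := ih (fun e he => hl e (List.mem_cons_of_mem _ he))
      have hstep : mergeDescFinal (chunkA x ++ chunksA (y :: rr))
          = chunkA x ++ mergeDescFinal (chunksA (y :: rr)) := by
        simp only [mergeDescFinal]
        rw [if_pos (by simp [hC]), if_pos hC,
          PySem.List.pyGet?_neg_one, PySem.List.pyGet?_neg_one,
          List.getLast?_append_of_ne_nil _ hC]
        split_ifs with h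
        · rw [PySem.List.slice_to_neg_one, PySem.List.slice_to_neg_one,
            List.dropLast_append_of_ne_nil hC]
        · rfl
      rw [show chunksA (x :: y :: rr) = chunkA x ++ chunksA (y :: rr) from rfl,
        hstep, ihr]
      rw [chunkA, if_neg hx, bChain, bChain, sepChain]
      split_ifs with hq <;> simp [List.append_assoc]

theorem chunksA_filter (l : List (List Char)) :
    chunksA l = chunksA (l.filter (fun e => e ≠ [])) := by
  induction l with
  | nil => rfl
  | cons e r ih =>
    by_cases he : e = []
    · simp [chunksA, chunkA, he, ih]
    · simp [chunksA, he, ih]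

-- ===== VERDICT (by name: the statement is the Claim_ definition above) =====
theorem merge_desc_spec : Claim_equal_merge_desc := by
  intro desc_list _
  unfold Spec_merge_desc
  simp only [merge_desc, merge_desc_alt]
  rw [← List.foldl_map (f := String.toList), foldA_eq, List.nil_append]
  rw [← List.foldl_map (f := String.toList)]
  have hmf : (desc_list.filter (fun e => decide (e ≠ ""))).map String.toList
      = (desc_list.map String.toList).filter (fun e => e ≠ []) := by
    rw [List.filter_map]
    congr 1
    apply List.filter_congr
    intro s _
    simp [Function.comp, String.toList_eq_nil_iff]
  rw [hmf, foldB_bChain]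
  rw [chunksA_filter]
  apply congrArg
  apply strip_chunks
  intro e he
  simpa using List.of_mem_filter he
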